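-- pv_equiv track=rewrite | github.com/ac2pic/ftpsync | watcher.py | getAllSubpaths
-- ===== SOURCE A (Python) =====
-- import posixpath
--
-- def getAllSubpaths(filePath):
--     subpaths = set()
--     pathPieces = filePath.split(posixpath.sep)
--     rootPathPieces = []
--     for pathPiece in pathPieces:
--         rootPathPieces.append(pathPiece)
--         if pathPiece == "":
--             continue
--         subpaths.add(posixpath.sep.join(rootPathPieces))
--     return subpaths
-- ===== SOURCE B (Python) =====
-- def getAllSubpaths(filePath):
--     subpaths = set()
--     for p, ch in enumerate(filePath):
--         if ch == "/" and p > 0 and filePath[p - 1] != "/":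
--             subpaths.add(filePath[:p])
--     if filePath and filePath[-1] != "/":
--         subpaths.add(filePath)
--     return subpaths
-- ===== Notes on version B (the rewrite author's own statement) =====
-- stated objective: alternative
-- what changed: B replaces A's split-on-sep / accumulate-pieces / join-per-piece pipeline by a single scan over the raw string that adds the slice filePath[:p] at every separator position p preceded by a non-separator character, plus the whole string when it does not end in a separator.
import Mathlib
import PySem

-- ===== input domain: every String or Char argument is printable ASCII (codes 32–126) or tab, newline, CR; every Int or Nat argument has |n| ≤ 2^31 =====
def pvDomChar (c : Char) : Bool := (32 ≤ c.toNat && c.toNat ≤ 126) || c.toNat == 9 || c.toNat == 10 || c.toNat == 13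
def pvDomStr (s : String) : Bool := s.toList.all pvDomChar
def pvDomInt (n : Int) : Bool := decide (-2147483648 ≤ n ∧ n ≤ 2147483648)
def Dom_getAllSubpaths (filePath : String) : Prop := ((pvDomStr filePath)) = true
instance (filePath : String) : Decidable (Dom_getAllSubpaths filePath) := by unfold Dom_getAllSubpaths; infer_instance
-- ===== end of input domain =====

-- B replaces A's split/accumulate/join over path pieces by a direct scan over separator
-- positions that adds raw slices of the input (objective: alternative, same cost).

-- ===== PORT A =====
-- A: split on "/", accumulate pieces, join the accumulated pieces into each added subpath.
def getAllSubpaths (filePath : String) : List String :=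
  let pathPieces := PySem.Chars.splitOn filePath.toList ['/']
  let r := pathPieces.foldl
    (fun (st : List (List Char) × PySem.Set (List Char)) pathPiece =>
      let rootPathPieces := st.1 ++ [pathPiece]
      if pathPiece = [] then (rootPathPieces, st.2)
      else (rootPathPieces, PySem.Set.add st.2 (PySem.Chars.join ['/'] rootPathPieces)))
    ([], PySem.Set.empty)
  r.2.map String.ofList

-- ===== PORT B =====
-- B: for each position p holding '/' with a non-'/' character just before it, add filePath[:p];
-- finally add the whole string if nonempty and not ending in '/'.
def getAllSubpaths_alt (filePath : String) : List String :=
  let cs := filePath.toList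
  let subpaths := (PySem.List.enumerate cs 0).foldl
    (fun (subpaths : PySem.Set (List Char)) pc =>
      if pc.2 = '/' ∧ 0 < pc.1 ∧ PySem.List.pyGet? cs (pc.1 - 1) ≠ some '/'
      then PySem.Set.add subpaths (PySem.List.slice cs none (some pc.1))
      else subpaths)
    PySem.Set.empty
  let subpaths' := if cs ≠ [] ∧ PySem.List.pyGet? cs (-1) ≠ some '/'
    then PySem.Set.add subpaths cs else subpaths
  subpaths'.map String.ofList

-- ===== PRECONDITION & SPEC =====
def Spec_getAllSubpaths (filePath : String) (out : List String) : Prop := out = getAllSubpaths_alt filePath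
instance (filePath : String) (out : List String) : Decidable (Spec_getAllSubpaths filePath out) := by unfold Spec_getAllSubpaths; infer_instance

-- ===== CLAIM (what is proved, stated in full; the proofs are below) =====
def Claim_equal_getAllSubpaths : Prop := ∀ (filePath : String), Dom_getAllSubpaths filePath → Spec_getAllSubpaths filePath (getAllSubpaths filePath)

-- ===== LEMMAS AND PROOFS =====

-- structural version of split on the single separator '/'
def splitCh : List Char → List (List Char)
  | [] => [[]]
  | c :: t => if c = '/' then [] :: splitCh t else (splitCh t).modifyHead (c :: ·)

-- does pre end in a character other than '/' ?
def lastNonSep (pre : List Char) : Bool :=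
  match pre.getLast? with
  | some c => decide (c ≠ '/')
  | none => false

-- the common add-sequence: F pre t = subpaths added while scanning t after consumed prefix pre
def F : List Char → List Char → List (List Char)
  | pre, [] => if lastNonSep pre then [pre] else []
  | pre, c :: t => (if c = '/' ∧ lastNonSep pre then [pre] else []) ++ F (pre ++ [c]) t

-- the joins A adds while folding pieces ps with accumulated root pieces
def gAdds : List (List Char) → List (List Char) → List (List Char)
  | _, [] => []
  | root, p :: ps =>
      (if p = [] then [] else [PySem.Chars.join ['/'] (root ++ [p])]) ++ gAdds (root ++ [p]) ps

lemma modifyHead_nil_append (l : List (List Char)) : l.modifyHead (([] : List Char) ++ ·) = l := by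
  cases l <;> simp

lemma modifyHead_id' (l : List (List Char)) : l.modifyHead (fun x => x) = l := by
  cases l <;> simp

lemma splitCh_ne_nil (l : List Char) : splitCh l ≠ [] := by
  cases l with
  | nil => simp [splitCh]
  | cons c t =>
    simp only [splitCh]
    split
    · simp
    · cases h : splitCh t with
      | nil => exact absurd h (splitCh_ne_nil t)
      | cons q qs => simp

lemma go_eq (fuel : Nat) : ∀ (l cur : List Char) (acc : List (List Char)), l.length ≤ fuel →
    PySem.Chars.splitOn.go ['/'] fuel l cur acc
      = acc.reverse ++ (splitCh l).modifyHead (cur.reverse ++ ·) := by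
  induction fuel with
  | zero =>
    intro l cur acc h
    have : l = [] := List.eq_nil_of_length_eq_zero (Nat.le_zero.mp h)
    subst this
    simp [PySem.Chars.splitOn.go, splitCh]
  | succ n ih =>
    intro l cur acc h
    cases l with
    | nil => simp [PySem.Chars.splitOn.go, splitCh]
    | cons c rest =>
      simp only [PySem.Chars.splitOn.go, List.isPrefixOf, Bool.and_true]
      by_cases hc : c = '/'
      · subst hc
        simp only [beq_self_eq_true, if_pos, List.length_cons] at *
        have hdrop : List.drop ((([] : List Char)).length + 1) ('/' :: rest) = rest := rfl
        rw [hdrop, ih rest [] (List.reverse cur :: acc) (by omega)]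
        simp [splitCh, modifyHead_id']
      · have : (('/' : Char) == c) = false := beq_eq_false_iff_ne.mpr (fun h => hc h.symm)
        simp only [this, Bool.false_eq_true, if_neg, not_false_eq_true]
        rw [ih rest (c :: cur) acc (by simpa using Nat.lt_succ_iff.mp (by simpa using h))]
        simp only [splitCh, if_neg hc]
        cases hsp : splitCh rest with
        | nil => exact absurd hsp (splitCh_ne_nil rest)
        | cons q qs => simp

lemma splitOn_eq (l : List Char) : PySem.Chars.splitOn l ['/'] = splitCh l := by
  show PySem.Chars.splitOn.go ['/'] (l.length + 1) l [] [] = splitCh l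
  rw [go_eq (l.length + 1) l [] [] (by omega)]
  simp [modifyHead_id']

lemma foldA (pieces : List (List Char)) : ∀ (root : List (List Char)) (s : PySem.Set (List Char)),
    (pieces.foldl
      (fun (st : List (List Char) × PySem.Set (List Char)) pathPiece =>
        let rootPathPieces := st.1 ++ [pathPiece]
        if pathPiece = [] then (rootPathPieces, st.2)
        else (rootPathPieces, PySem.Set.add st.2 (PySem.Chars.join ['/'] rootPathPieces)))
      (root, s)).2
    = (gAdds root pieces).foldl PySem.Set.add s := by
  induction pieces with
  | nil => intro root s; simp [gAdds]
  | cons p ps ih =>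
    intro root s
    by_cases hp : p = []
    · subst hp; simpa [gAdds] using ih (root ++ [[]]) s
    · simpa [gAdds, hp] using ih (root ++ [p]) (PySem.Set.add s (PySem.Chars.join ['/'] (root ++ [p])))

lemma gmap (ps : List (List Char)) : ∀ (r : List (List Char)) (x : List Char),
    gAdds (x :: r) ps = (gAdds r ps).map ((x ++ ['/']) ++ ·) := by
  induction ps with
  | nil => intro r x; simp [gAdds]
  | cons p ps ih =>
    intro r x
    have hjoin : PySem.Chars.join ['/'] ((x :: r) ++ [p])
        = (x ++ ['/']) ++ PySem.Chars.join ['/'] (r ++ [p]) := by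
      cases r with
      | nil => simp [PySem.Chars.join_cons_cons, PySem.Chars.join_singleton]
      | cons y r' => simp [PySem.Chars.join_cons_cons]
    by_cases hp : p = []
    · subst hp
      simpa [gAdds] using ih (r ++ [[]]) x
    · simp only [gAdds, if_neg hp, List.map_append, List.map_cons, List.map_nil]
      rw [hjoin]
      have := ih (r ++ [p]) x
      simp only [List.cons_append] at this ⊢
      rw [this]

lemma lastNonSep_append (a b : List Char) (hb : b ≠ []) : lastNonSep (a ++ b) = lastNonSep b := by
  simp [lastNonSep, List.getLast?_append_of_ne_nil a hb]

lemma lastNonSep_of_noSep (w : List Char) (hw : '/' ∉ w) : lastNonSep w = decide (w ≠ []) := by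
  cases hlast : w.getLast? with
  | none => simp [lastNonSep, List.getLast?_eq_none_iff.mp hlast]
  | some c =>
    have hmem : c ∈ w := List.mem_of_getLast? hlast
    have hne : w ≠ [] := by rintro rfl; simp at hmem
    have : c ≠ '/' := fun h => hw (h ▸ hmem)
    simp [lastNonSep, hlast, this, hne]

lemma Fpre (t : List Char) : ∀ (a b : List Char), b ≠ [] →
    F (a ++ b) t = (F b t).map (a ++ ·) := by
  induction t with
  | nil => intro a b hb; simp [F, lastNonSep_append a b hb]; split <;> simp
  | cons c t ih =>
    intro a b hb
    simp only [F, lastNonSep_append a b hb, List.map_append]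
    congr 1
    · split <;> simp
    · rw [List.append_assoc, ih a (b ++ [c]) (by simp)]

lemma Fsep (t : List Char) : F ['/'] t = (F [] t).map (['/'] ++ ·) := by
  cases t with
  | nil => simp [F, lastNonSep]
  | cons c t =>
    have h1 : lastNonSep ['/'] = false := by simp [lastNonSep]
    have h2 : lastNonSep ([] : List Char) = false := by simp [lastNonSep]
    have h3 : F ['/', c] t = List.map (fun x => '/' :: x) (F [c] t) := by
      simpa using Fpre t ['/'] [c] (by simp)
    simp [F, h1, h2, h3]

lemma map_append_map (l : List (List Char)) (a b : List Char) :
    (l.map (b ++ ·)).map (a ++ ·) = l.map ((a ++ b) ++ ·) := by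
  rw [List.map_map]
  apply List.map_congr_left
  intro x _
  simp [Function.comp, List.append_assoc]

lemma M (l : List Char) : ∀ (w : List Char), '/' ∉ w →
    gAdds [] ((splitCh l).modifyHead (w ++ ·)) = F w l := by
  induction l with
  | nil =>
    intro w hw
    simp only [splitCh, List.modifyHead_cons, F, lastNonSep_of_noSep w hw]
    by_cases hwe : w = []
    · subst hwe; simp [gAdds]
    · simp [gAdds, hwe, PySem.Chars.join_singleton]
  | cons c t ih =>
    intro w hw
    by_cases hc : c = '/'
    · subst hc
      rw [show splitCh ('/' :: t) = [] :: splitCh t from by simp [splitCh]]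
      simp only [List.modifyHead_cons, List.append_nil]
      have hps : gAdds [] (splitCh t) = F [] t := by
        have := ih [] (by simp)
        simpa [modifyHead_id'] using this
      have hfw : F (w ++ ['/']) t = (F [] t).map ((w ++ ['/']) ++ ·) := by
        rw [Fpre t w ['/'] (by simp), Fsep t, map_append_map]
      by_cases hwe : w = []
      · subst hwe
        simp [F, gAdds, gmap, hps, Fsep, lastNonSep_of_noSep ([] : List Char) (by simp)]
      · simp [F, gAdds, gmap, hps, hfw, hwe, lastNonSep_of_noSep w hw,
          PySem.Chars.join_singleton]
    · have hw' : '/' ∉ w ++ [c] := by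
        simp only [List.mem_append, List.mem_singleton]
        rintro (h | h)
        · exact hw h
        · exact hc h.symm
      have : (splitCh (c :: t)).modifyHead (w ++ ·)
          = (splitCh t).modifyHead ((w ++ [c]) ++ ·) := by
        simp only [splitCh, if_neg hc]
        cases hsp : splitCh t with
        | nil => exact absurd hsp (splitCh_ne_nil t)
        | cons q qs => simp
      rw [this, ih (w ++ [c]) hw']
      simp [F, hc]

lemma pyGet?_neg_one (l : List Char) : PySem.List.pyGet? l (-1) = l.getLast? := by
  cases l with
  | nil => simp [PySem.List.pyGet?, PySem.List.pyIdx?]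
  | cons x xs =>
    have h2 : -(((x :: xs).length : Int)) ≤ -1 := by
      simp only [List.length_cons]
      omega
    simp [PySem.List.pyGet?, PySem.List.pyIdx?, List.getLast?_eq_getElem?]

lemma pyGet?_pred (pre t : List Char) (hpre : pre ≠ []) :
    PySem.List.pyGet? (pre ++ t) ((pre.length : Int) - 1) = pre.getLast? := by
  have hlen : 0 < pre.length := List.length_pos_iff.mpr hpre
  have hcast : ((pre.length : Int) - 1) = ((pre.length - 1 : Nat) : Int) := by omega
  rw [hcast, PySem.List.pyGet?_natCast]
  rw [List.getElem?_append_left (by omega)]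
  rw [List.getLast?_eq_getElem?]

lemma lastNonSep_iff (pre : List Char) :
    (pre ≠ [] ∧ PySem.List.pyGet? pre (-1) ≠ some '/') ↔ lastNonSep pre = true := by
  rw [pyGet?_neg_one]
  cases hlast : pre.getLast? with
  | none =>
    have : pre = [] := List.getLast?_eq_none_iff.mp hlast
    simp [lastNonSep, this]
  | some c =>
    have hmem : c ∈ pre := List.mem_of_getLast? hlast
    have hne : pre ≠ [] := by rintro rfl; simp at hmem
    simp [lastNonSep, hlast, hne]

lemma Bmain (t : List Char) : ∀ (pre : List Char) (s0 : PySem.Set (List Char)),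
    (let r := (PySem.List.enumerate t (pre.length : Int)).foldl
        (fun (s : PySem.Set (List Char)) pc =>
          if pc.2 = '/' ∧ 0 < pc.1 ∧ PySem.List.pyGet? (pre ++ t) (pc.1 - 1) ≠ some '/'
          then PySem.Set.add s (PySem.List.slice (pre ++ t) none (some pc.1))
          else s) s0
     if pre ++ t ≠ [] ∧ PySem.List.pyGet? (pre ++ t) (-1) ≠ some '/'
     then PySem.Set.add r (pre ++ t) else r)
    = (F pre t).foldl PySem.Set.add s0 := by
  induction t with
  | nil =>
    intro pre s0
    simp only [PySem.List.enumerate_nil, List.foldl_nil, List.append_nil, F]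
    by_cases h : pre ≠ [] ∧ PySem.List.pyGet? pre (-1) ≠ some '/'
    · rw [if_pos h, if_pos ((lastNonSep_iff pre).mp h)]; simp
    · rw [if_neg h, if_neg (by intro hl; exact h ((lastNonSep_iff pre).mpr hl))]; simp
  | cons c t ih =>
    intro pre s0
    have hcond : (c = '/' ∧ 0 < (pre.length : Int) ∧
        PySem.List.pyGet? (pre ++ c :: t) ((pre.length : Int) - 1) ≠ some '/')
        ↔ (c = '/' ∧ lastNonSep pre = true) := by
      constructor
      · rintro ⟨h1, h2, h3⟩
        have hpre : pre ≠ [] := by intro h; subst h; simp at h2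
        rw [pyGet?_pred pre (c :: t) hpre] at h3
        refine ⟨h1, ?_⟩
        rw [← lastNonSep_iff]
        exact ⟨hpre, by rwa [pyGet?_neg_one]⟩
      · rintro ⟨h1, h2⟩
        have := (lastNonSep_iff pre).mpr h2
        refine ⟨h1, by simpa using List.length_pos_iff.mpr this.1, ?_⟩
        rw [pyGet?_pred pre (c :: t) this.1]
        rw [pyGet?_neg_one] at this
        exact this.2
    have hslice : PySem.List.slice (pre ++ c :: t) none (some (pre.length : Int)) = pre := by
      rw [PySem.List.slice_to (pre ++ c :: t) (by positivity)]
      simp [List.take_left']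
    have hassoc : pre ++ c :: t = (pre ++ [c]) ++ t := by simp
    have hlen : (pre.length : Int) + 1 = ((pre ++ [c]).length : Int) := by simp
    simp only [PySem.List.enumerate_cons, List.foldl_cons, F]
    by_cases hc : c = '/' ∧ lastNonSep pre = true
    · rw [if_pos (hcond.mpr hc), hslice]
      simp only [if_pos hc, List.foldl_append, List.foldl_cons, List.foldl_nil]
      have := ih (pre ++ [c]) (PySem.Set.add s0 pre)
      rw [hlen, hassoc]
      simpa using this
    · rw [if_neg (fun h => hc (hcond.mp h))]
      simp only [if_neg hc, List.nil_append]
      have := ih (pre ++ [c]) s0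
      rw [hlen, hassoc]
      simpa using this

lemma portA_eq (filePath : String) :
    getAllSubpaths filePath = ((F [] filePath.toList).foldl PySem.Set.add PySem.Set.empty).map String.ofList := by
  simp only [getAllSubpaths]
  rw [splitOn_eq, foldA]
  congr 1
  have := M filePath.toList [] (by simp)
  rw [modifyHead_nil_append] at this
  rw [this]

lemma portB_eq (filePath : String) :
    getAllSubpaths_alt filePath = ((F [] filePath.toList).foldl PySem.Set.add PySem.Set.empty).map String.ofList := by
  simp only [getAllSubpaths_alt]
  have := Bmain filePath.toList [] PySem.Set.empty
  simp only [List.nil_append, List.length_nil, Nat.cast_zero] at this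
  rw [← this]

-- ===== VERDICT (by name: the statement is the Claim_ definition above) =====
theorem getAllSubpaths_spec : Claim_equal_getAllSubpaths := by
  intro filePath _
  unfold Spec_getAllSubpaths
  rw [portA_eq, portB_eq]
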